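-- pv_equiv track=rewrite | github.com/jnuo/viziai | _legacy/src/sheets_updater.py | _sort_rows_by_original_order
-- ===== SOURCE A (Python) =====
-- def _sort_rows_by_original_order(data, original_row_order):
--     """
--     Sort data rows to match the original row order.
--     New metrics (not in original order) are appended at the end.
--     """
--     if not data or len(data) < 2:
--         return data
--
--     header = data[0]
--     rows = data[1:]
--
--     # Build order map: metric_name -> position
--     order_map = {name: idx for idx, name in enumerate(original_row_order)}
--
--     # Sort rows: original metrics in their original order, new ones at the end
--     def sort_key(row):
--         metric = (row[0] or "").strip()
--         if metric in order_map:
--             return (0, order_map[metric])  # Original metrics first, in original order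
--         return (1, metric.lower())  # New metrics at end, sorted alphabetically
--
--     sorted_rows = sorted(rows, key=sort_key)
--
--     return [header] + sorted_rows
-- ===== SOURCE B (Python) =====
-- def _sort_rows_by_original_order(data, original_row_order):
--     if not data or len(data) < 2:
--         return data
--
--     header = data[0]
--     rows = data[1:]
--
--     order_map = {name: idx for idx, name in enumerate(original_row_order)}
--
--     # Partition into known metrics and new metrics, then sort each bucket
--     # with its own simple key; equivalent to A's single composite-key stable sort.
--     originals, news = [], []
--     for row in rows:
--         metric = (row[0] or "").strip()
--         (originals if metric in order_map else news).append(row)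
--
--     originals.sort(key=lambda row: order_map[(row[0] or "").strip()])
--     news.sort(key=lambda row: (row[0] or "").strip().lower())
--
--     return [header] + originals + news
-- ===== Notes on version B (the rewrite author's own statement) =====
-- stated objective: alternative
-- what changed: Replaces A's single stable sort under a composite heterogeneous key (0,index)/(1,lower) by a one-pass partition into known/new metric buckets followed by two independent sorts with simple keys (index only, lowercase name only), concatenated.
import Mathlib
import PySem

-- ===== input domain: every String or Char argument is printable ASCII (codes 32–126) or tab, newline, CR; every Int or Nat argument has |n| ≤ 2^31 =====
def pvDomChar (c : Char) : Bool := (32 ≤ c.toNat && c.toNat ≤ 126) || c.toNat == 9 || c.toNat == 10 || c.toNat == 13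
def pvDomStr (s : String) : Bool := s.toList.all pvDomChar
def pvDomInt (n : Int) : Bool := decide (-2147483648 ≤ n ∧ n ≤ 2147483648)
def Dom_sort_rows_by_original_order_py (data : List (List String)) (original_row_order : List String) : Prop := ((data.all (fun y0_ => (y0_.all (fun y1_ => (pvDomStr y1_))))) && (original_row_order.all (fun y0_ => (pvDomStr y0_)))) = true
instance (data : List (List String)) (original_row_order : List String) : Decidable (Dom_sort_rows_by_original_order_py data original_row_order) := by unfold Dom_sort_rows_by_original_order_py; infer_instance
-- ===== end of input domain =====

-- B replaces A's single composite-key stable sort by a partition into two buckets sorted with simple keys (alternative decomposition, same cost).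
-- Pre_ excludes only inputs where Python raises (an empty row among data[1:] makes row[0] an IndexError in both A and B).

-- ===== PORT A =====

-- metric = (row[0] or "").strip(); under Pre_ every row is nonempty so getD "" is exact
-- (and `or ""` maps "" to "", which strips to "" either way).
def pvMetric (row : List String) : String :=
  PySem.Str.strip ((PySem.List.pyGet? row 0).getD "")

-- order_map = {name: idx for idx, name in enumerate(original_row_order)}
def pvOrderMap (original_row_order : List String) : PySem.Dict String Int :=
  (PySem.List.enumerate original_row_order).foldl (fun d p => d.insert p.2 p.1) PySem.Dict.empty

-- sort_key(row): (0, order_map[metric]) if metric in order_map else (1, metric.lower())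
def pvKeyA (om : PySem.Dict String Int) (row : List String) : Int × (Int ⊕ String) :=
  match om.get? (pvMetric row) with
  | some i => (0, Sum.inl i)
  | none => (1, Sum.inr (PySem.Str.lower (pvMetric row)))

-- Python's `<` on the heterogeneous tuples A's keys form: compare first components,
-- then the second components (always of the same class inside one comparison here).
def pvTupleLt : Int × (Int ⊕ String) → Int × (Int ⊕ String) → Bool
  | (a, x), (b, y) =>
    if a < b then true
    else if b < a then false
    else
      match x, y with
      | Sum.inl i, Sum.inl j => decide (i < j)
      | Sum.inr s, Sum.inr t => decide (s < t)
      | _, _ => false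

-- sorted(rows, key=sort_key): Python's stable sort, ported by hand as the stable
-- insertion sort PySem.List.sorted itself is (cf. sorted_eq_foldl_insertBy); exact.
def sort_rows_by_original_order_py (data : List (List String)) (original_row_order : List String) : List (List String) :=
  if data = [] ∨ data.length < 2 then data
  else
    match data with
    | [] => data
    | header :: rows =>
      let om := pvOrderMap original_row_order
      let sorted_rows := rows.foldl
        (fun acc r => PySem.List.insertBy (fun a b => pvTupleLt (pvKeyA om a) (pvKeyA om b)) r acc) []
      header :: sorted_rows

-- ===== PORT B =====

def sort_rows_by_original_order_py_alt (data : List (List String)) (original_row_order : List String) : List (List String) :=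
  if data = [] ∨ data.length < 2 then data
  else
    match data with
    | [] => data
    | header :: rows =>
      let om := pvOrderMap original_row_order
      -- one pass: append each row to the originals or the news bucket
      let part := rows.foldl
        (fun (p : List (List String) × List (List String)) r =>
          if om.contains (pvMetric r) then (p.1 ++ [r], p.2) else (p.1, p.2 ++ [r])) ([], [])
      -- order_map[metric] is always present for originals, so getD 0 is exact (no KeyError)
      header :: (PySem.List.sorted part.1 (fun r => om.getD (pvMetric r) 0)
                  ++ PySem.List.sorted part.2 (fun r => PySem.Str.lower (pvMetric r)))

-- ===== PRECONDITION & SPEC =====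
-- Pre_ excludes exactly the inputs on which Python A raises IndexError: an empty row among data[1:]
-- (only reachable when the early return does not fire).
def Pre_sort_rows_by_original_order_py (data : List (List String)) (original_row_order : List String) : Prop :=
  data.length < 2 ∨ ∀ row ∈ data.tail, row ≠ []
instance (data : List (List String)) (original_row_order : List String) : Decidable (Pre_sort_rows_by_original_order_py data original_row_order) := by unfold Pre_sort_rows_by_original_order_py; infer_instance

def pvWitness_sort_rows_by_original_order_py : List (List String) × List String :=
  ([["h"], ["b", "2"], ["a", "1"]], ["a"])

def Spec_sort_rows_by_original_order_py (data : List (List String)) (original_row_order : List String) (out : List (List String)) : Prop := out = sort_rows_by_original_order_py_alt data original_row_order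
instance (data : List (List String)) (original_row_order : List String) (out : List (List String)) : Decidable (Spec_sort_rows_by_original_order_py data original_row_order out) := by unfold Spec_sort_rows_by_original_order_py; infer_instance

-- ===== CLAIM (what is proved, stated in full; the proofs are below) =====
def Claim_equal_sort_rows_by_original_order_py : Prop := ∀ (data : List (List String)) (original_row_order : List String), Dom_sort_rows_by_original_order_py data original_row_order → Pre_sort_rows_by_original_order_py data original_row_order → Spec_sort_rows_by_original_order_py data original_row_order (sort_rows_by_original_order_py data original_row_order)

-- ===== LEMMAS AND PROOFS =====

-- inserting x when it goes before everything in N: insertion happens inside O (or right before N)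
theorem pv_insertBy_append_left {α : Type} (before : α → α → Bool) (x : α) (O N : List α)
    (hN : ∀ n ∈ N, before x n = true) :
    PySem.List.insertBy before x (O ++ N) = PySem.List.insertBy before x O ++ N := by
  induction O with
  | nil =>
    cases N with
    | nil => rfl
    | cons n ns => simp [PySem.List.insertBy, hN n (by simp)]
  | cons o O' ih =>
    by_cases h : before x o = true
    · simp [PySem.List.insertBy, h]
    · simp only [Bool.not_eq_true] at h
      simp [PySem.List.insertBy, h, ih]

-- inserting x when it goes after everything in O: insertion happens inside N
theorem pv_insertBy_append_right {α : Type} (before : α → α → Bool) (x : α) (O N : List α)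
    (hO : ∀ o ∈ O, before x o = false) :
    PySem.List.insertBy before x (O ++ N) = O ++ PySem.List.insertBy before x N := by
  induction O with
  | nil => rfl
  | cons o O' ih =>
    simp [PySem.List.insertBy, hO o (by simp), ih (fun o ho => hO o (by simp [ho]))]

-- the comparator only looks at x vs list elements
theorem pv_insertBy_congr {α : Type} (f g : α → α → Bool) (x : α) (ys : List α)
    (h : ∀ y ∈ ys, f x y = g x y) :
    PySem.List.insertBy f x ys = PySem.List.insertBy g x ys := by
  induction ys with
  | nil => rfl
  | cons y ys' ih =>
    have hy := h y (by simp)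
    by_cases hf : f x y = true
    · simp [PySem.List.insertBy, hf, hy ▸ hf]
    · simp only [Bool.not_eq_true] at hf
      simp [PySem.List.insertBy, hf, hy ▸ hf, ih (fun y hy' => h y (by simp [hy']))]

-- appending one element to a stable sort = inserting it
theorem pv_sorted_append_singleton {α κ : Type} [LT κ] [DecidableLT κ]
    (zs : List α) (x : α) (key : α → κ) :
    PySem.List.sorted (zs ++ [x]) key =
      PySem.List.insertBy (fun a b => decide (key a < key b)) x (PySem.List.sorted zs key) := by
  rw [PySem.List.sorted_eq_foldl_insertBy, PySem.List.sorted_eq_foldl_insertBy, List.foldl_append]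
  rfl

-- A's key at a row the order map contains / does not contain
theorem pv_keyA_of_contains (om : PySem.Dict String Int) (r : List String)
    (h : om.contains (pvMetric r) = true) :
    pvKeyA om r = (0, Sum.inl (om.getD (pvMetric r) 0)) := by
  rw [PySem.Dict.contains_eq_isSome_get?] at h
  obtain ⟨i, hi⟩ := Option.isSome_iff_exists.mp h
  simp [pvKeyA, hi, PySem.Dict.getD_eq_get?_getD]

theorem pv_keyA_of_not_contains (om : PySem.Dict String Int) (r : List String)
    (h : om.contains (pvMetric r) = false) :
    pvKeyA om r = (1, Sum.inr (PySem.Str.lower (pvMetric r))) := by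
  rw [PySem.Dict.contains_eq_isSome_get?] at h
  have : om.get? (pvMetric r) = none := by
    cases hg : om.get? (pvMetric r) with
    | none => rfl
    | some i => rw [hg] at h; simp at h
  simp [pvKeyA, this]

-- main invariant: A's insertion-sort loop produces B's two sorted buckets concatenated
theorem pv_main (om : PySem.Dict String Int) (rows : List (List String)) :
    rows.foldl (fun acc r => PySem.List.insertBy (fun a b => pvTupleLt (pvKeyA om a) (pvKeyA om b)) r acc) [] =
      PySem.List.sorted (rows.filter (fun r => om.contains (pvMetric r))) (fun r => om.getD (pvMetric r) 0)
      ++ PySem.List.sorted (rows.filter (fun r => !om.contains (pvMetric r))) (fun r => PySem.Str.lower (pvMetric r)) := by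
  induction rows using List.reverseRecOn with
  | nil => rfl
  | append_singleton rows x ih =>
    rw [List.foldl_append, List.foldl_cons, List.foldl_nil, ih, List.filter_append, List.filter_append]
    by_cases hx : om.contains (pvMetric x) = true
    · rw [pv_insertBy_append_left _ _ _ _ (fun n hn => by
        have hn' := (PySem.List.mem_sorted _ _ _ _).mp hn
        have hnc : om.contains (pvMetric n) = false := by
          have := (List.mem_filter.mp hn').2; simpa using this
        rw [pv_keyA_of_contains om x hx, pv_keyA_of_not_contains om n hnc]
        simp [pvTupleLt])]
      rw [pv_insertBy_congr _ (fun a b => decide ((fun r => om.getD (pvMetric r) 0) a < (fun r => om.getD (pvMetric r) 0) b)) x _ (fun y hy => by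
        have hy' := (PySem.List.mem_sorted _ _ _ _).mp hy
        have hyc : om.contains (pvMetric y) = true := (List.mem_filter.mp hy').2
        rw [pv_keyA_of_contains om x hx, pv_keyA_of_contains om y hyc]
        simp [pvTupleLt])]
      rw [← pv_sorted_append_singleton]
      simp [hx]
    · simp only [Bool.not_eq_true] at hx
      rw [pv_insertBy_append_right _ _ _ _ (fun o ho => by
        have ho' := (PySem.List.mem_sorted _ _ _ _).mp ho
        have hoc : om.contains (pvMetric o) = true := (List.mem_filter.mp ho').2
        rw [pv_keyA_of_not_contains om x hx, pv_keyA_of_contains om o hoc]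
        simp [pvTupleLt])]
      rw [pv_insertBy_congr _ (fun a b => decide ((fun r => PySem.Str.lower (pvMetric r)) a < (fun r => PySem.Str.lower (pvMetric r)) b)) x _ (fun y hy => by
        have hy' := (PySem.List.mem_sorted _ _ _ _).mp hy
        have hyc : om.contains (pvMetric y) = false := by
          have := (List.mem_filter.mp hy').2; simpa using this
        rw [pv_keyA_of_not_contains om x hx, pv_keyA_of_not_contains om y hyc]
        simp [pvTupleLt])]
      rw [← pv_sorted_append_singleton]
      simp [hx]

-- B's bucket loop is the two filters
theorem pv_part (om : PySem.Dict String Int) (rows : List (List String)) :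
    ∀ o n : List (List String),
    rows.foldl (fun (p : List (List String) × List (List String)) r =>
        if om.contains (pvMetric r) then (p.1 ++ [r], p.2) else (p.1, p.2 ++ [r])) (o, n) =
      (o ++ rows.filter (fun r => om.contains (pvMetric r)),
       n ++ rows.filter (fun r => !om.contains (pvMetric r))) := by
  induction rows with
  | nil => simp
  | cons r rows' ih =>
    intro o n
    by_cases h : om.contains (pvMetric r) = true
    · simp [h, ih]
    · simp only [Bool.not_eq_true] at h
      simp [h, ih]

-- ===== VERDICT (by name: the statement is the Claim_ definition above) =====
theorem sort_rows_by_original_order_py_spec : Claim_equal_sort_rows_by_original_order_py := by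
  intro data original_row_order _ _
  unfold Spec_sort_rows_by_original_order_py
  unfold sort_rows_by_original_order_py sort_rows_by_original_order_py_alt
  by_cases hg : data = [] ∨ data.length < 2
  · rw [if_pos hg, if_pos hg]
  · rw [if_neg hg, if_neg hg]
    cases data with
    | nil => rfl
    | cons header rows =>
      simp only
      rw [pv_main, pv_part]
      simp
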